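-- pv_equiv track=rewrite | github.com/supermax03/Validando-Palabras | validator.py | getvalidwords
-- ===== SOURCE A (Python) =====
-- class Dictionary:
--     dictionary = {'a': [],
--                   'b': [],
--                   'c': [],
--                   'd': [],
--                   'e': [],
--                   'f': [],
--                   'g': [],
--                   'h': [],
--                   'i': [],
--                   'j': [],
--                   'k': [],
--                   'l': [],
--                   'm': [],
--                   'n': [],
--                   'o': [],
--                   'p': [],
--                   'q': [],
--                   'r': [],
--                   't': ['tree', ],
--                   'u': ['urde', 'uref', 'urfe', 'used'],
--                   'v': ['vrde'],
--                   'w': [],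
--                   'x': [],
--                   'y': [],
--                   'z': []
--                   }
--
--     @classmethod
--     def getWords(cls, key):
--         result = []
--         if key in cls.dictionary.keys():
--             result = cls.dictionary[key]
--         return result
--
-- class Directory:
--     keypad = {'0': [],
--               '1': [],
--               '2': ['a', 'b', 'c'],
--               '3': ['d', 'e', 'f'],
--               '4': ['g', 'h', 'i'],
--               '5': ['j', 'k', 'l'],
--               '6': ['m', 'n', 'o'],
--               '7': ['p', 'q', 'r', 's'],
--               '8': ['t', 'u', 'v'],
--               '9': ['w', 'x', 'y''z']
--               }
--
--     @classmethod
--     def getLetters(cls, key):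
--         result = []
--         if key in cls.keypad.keys():
--             result = cls.keypad[key]
--         return result
--
-- def transform(words, letters=[], index=0):
--     result = []
--     for word in words:
--         if len(word) > index and word[index] in letters:
--             result.append(word)
--     return result
--
-- def getvalidwords(sequence):
--     result = []
--     digit = sequence[0]
--     letters = Directory.getLetters(digit)
--     for character in letters:
--         words = Dictionary.getWords(character)
--         for index in range(1, len(sequence)):
--             words = transform(words, Directory.getLetters(sequence[index]), index)
--         if len(words) > 0:
--             result.append(words)
--     return result
-- ===== SOURCE B (Python) =====
-- class Dictionary:
--     dictionary = {'a': [], 'b': [], 'c': [], 'd': [], 'e': [], 'f': [], 'g': [],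
--                   'h': [], 'i': [], 'j': [], 'k': [], 'l': [], 'm': [], 'n': [],
--                   'o': [], 'p': [], 'q': [], 'r': [],
--                   't': ['tree', ],
--                   'u': ['urde', 'uref', 'urfe', 'used'],
--                   'v': ['vrde'],
--                   'w': [], 'x': [], 'y': [], 'z': []}
--
--     @classmethod
--     def getWords(cls, key):
--         result = []
--         if key in cls.dictionary.keys():
--             result = cls.dictionary[key]
--         return result
--
--
-- class Directory:
--     keypad = {'0': [], '1': [],
--               '2': ['a', 'b', 'c'], '3': ['d', 'e', 'f'], '4': ['g', 'h', 'i'],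
--               '5': ['j', 'k', 'l'], '6': ['m', 'n', 'o'], '7': ['p', 'q', 'r', 's'],
--               '8': ['t', 'u', 'v'], '9': ['w', 'x', 'y''z']}
--
--     @classmethod
--     def getLetters(cls, key):
--         result = []
--         if key in cls.keypad.keys():
--             result = cls.keypad[key]
--         return result
--
--
-- # reverse index: each keypad letter -> its digit, so the per-position check
-- # is one dict lookup instead of a scan of the digit's letter list
-- LETTER_DIGIT = {letter: digit
--                 for digit, letters in Directory.keypad.items()
--                 for letter in letters}
--
--
-- def getvalidwords(sequence):
--     tail = sequence[1:]
--     groups = [[word for word in Dictionary.getWords(letter)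
--                if len(word) >= len(sequence)
--                and all(LETTER_DIGIT.get(c) == d for c, d in zip(word[1:], tail))]
--               for letter in Directory.getLetters(sequence[0])]
--     return [g for g in groups if g]
-- ===== Notes on version B (the rewrite author's own statement) =====
-- stated objective: alternative
-- what changed: B builds a reverse letter-to-digit index (LETTER_DIGIT) once and checks each word word-major with a single zip over the whole sequence, instead of A's index-major loop of repeated transform() passes that rebuilds an intermediate word list per sequence position; non-empty groups are collected by a comprehension over per-letter filtered lists rather than an accumulator loop.
import Mathlib
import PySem

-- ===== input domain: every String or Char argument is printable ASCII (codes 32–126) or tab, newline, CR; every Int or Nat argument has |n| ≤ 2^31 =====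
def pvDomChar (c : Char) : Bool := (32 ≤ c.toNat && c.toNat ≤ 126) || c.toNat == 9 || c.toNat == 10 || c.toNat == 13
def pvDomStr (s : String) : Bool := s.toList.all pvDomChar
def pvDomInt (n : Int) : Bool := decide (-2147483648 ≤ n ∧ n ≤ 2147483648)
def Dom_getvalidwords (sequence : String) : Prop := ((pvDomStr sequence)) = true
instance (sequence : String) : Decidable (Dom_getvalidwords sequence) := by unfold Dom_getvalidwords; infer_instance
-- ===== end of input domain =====

-- B replaces A's index-major repeated transform passes with a reverse letter→digit
-- index and a word-major zip check (objective: alternative decomposition).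

-- shared module context (the Dictionary / Directory class constants and lookups)
def pvDict : PySem.Dict String (List String) := PySem.Dict.ofList
  [("a", []), ("b", []), ("c", []), ("d", []), ("e", []), ("f", []), ("g", []),
   ("h", []), ("i", []), ("j", []), ("k", []), ("l", []), ("m", []), ("n", []),
   ("o", []), ("p", []), ("q", []), ("r", []),
   ("t", ["tree"]), ("u", ["urde", "uref", "urfe", "used"]), ("v", ["vrde"]),
   ("w", []), ("x", []), ("y", []), ("z", [])]

-- Dictionary.getWords: result = [] unless key is a dict key
def pvGetWords (key : String) : List String := (PySem.Dict.get? pvDict key).getD []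

def pvKeypad : PySem.Dict String (List String) := PySem.Dict.ofList
  [("0", []), ("1", []), ("2", ["a", "b", "c"]), ("3", ["d", "e", "f"]),
   ("4", ["g", "h", "i"]), ("5", ["j", "k", "l"]), ("6", ["m", "n", "o"]),
   ("7", ["p", "q", "r", "s"]), ("8", ["t", "u", "v"]), ("9", ["w", "x", "yz"])]
   -- "yz" keeps Python's 'y''z' string-concatenation quirk

-- Directory.getLetters
def pvGetLetters (key : String) : List String := (PySem.Dict.get? pvKeypad key).getD []

-- s[i] as the 1-char Python string; both Pythons only use it with i in range
def pvCharAt (s : String) (i : Int) : String :=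
  match PySem.Str.pyGet? s i with
  | some c => String.ofList [c]
  | none => ""

-- ===== PORT A =====
-- transform(words, letters, index): keep words with len(word) > index and word[index] in letters
def pvTransform (words : List String) (letters : List String) (index : Int) : List String :=
  words.foldl (fun result word =>
    if (decide (index < PySem.Str.len word)) &&
       ((PySem.Str.pyGet? word index).elim false (fun c => letters.contains (String.ofList [c])))
    then result ++ [word] else result) []

def getvalidwords (sequence : String) : List (List String) :=
  match PySem.Str.pyGet? sequence 0 with   -- sequence[0]; IndexError on "" excluded by Pre_
  | none => []
  | some digit =>
    (pvGetLetters (String.ofList [digit])).foldl (fun result character =>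
      let words := (PySem.List.pyRange 1 (PySem.Str.len sequence) 1).foldl
        (fun words index => pvTransform words (pvGetLetters (pvCharAt sequence index)) index)
        (pvGetWords character)
      if words.length > 0 then result ++ [words] else result) []

-- ===== PORT B =====
-- LETTER_DIGIT: reverse index keypad letter → digit (the "yz" entry is kept)
def pvLetterDigit : PySem.Dict String String := PySem.Dict.ofList
  [("a", "2"), ("b", "2"), ("c", "2"), ("d", "3"), ("e", "3"), ("f", "3"),
   ("g", "4"), ("h", "4"), ("i", "4"), ("j", "5"), ("k", "5"), ("l", "5"),
   ("m", "6"), ("n", "6"), ("o", "6"), ("p", "7"), ("q", "7"), ("r", "7"), ("s", "7"),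
   ("t", "8"), ("u", "8"), ("v", "8"), ("w", "9"), ("x", "9"), ("yz", "9")]

def getvalidwords_alt (sequence : String) : List (List String) :=
  match PySem.Str.pyGet? sequence 0 with   -- sequence[0]; IndexError on "" excluded by Pre_
  | none => []
  | some digit =>
    let tail := PySem.Str.slice sequence (some 1) none
    let groups := (pvGetLetters (String.ofList [digit])).map (fun letter =>
      (pvGetWords letter).filter (fun word =>
        decide (PySem.Str.len sequence ≤ PySem.Str.len word) &&
        ((List.zip (PySem.Str.slice word (some 1) none).toList tail.toList).all (fun cd =>
          (PySem.Dict.get? pvLetterDigit (String.ofList [cd.1])).elim false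
            (fun v => v == String.ofList [cd.2])))))
    groups.filter (fun g => !g.isEmpty)

-- ===== PRECONDITION & SPEC =====
-- Pre_ excludes only the empty string, on which Python A raises IndexError at sequence[0]
def Pre_getvalidwords (sequence : String) : Prop := sequence ≠ ""
instance (sequence : String) : Decidable (Pre_getvalidwords sequence) := by
  unfold Pre_getvalidwords; infer_instance
def pvWitness_getvalidwords : String := "873"

def Spec_getvalidwords (sequence : String) (out : List (List String)) : Prop :=
  out = getvalidwords_alt sequence
instance (sequence : String) (out : List (List String)) : Decidable (Spec_getvalidwords sequence out) := by
  unfold Spec_getvalidwords; infer_instance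

-- ===== CLAIM (what is proved, stated in full; the proofs are below) =====
def Claim_equal_getvalidwords : Prop := ∀ (sequence : String), Dom_getvalidwords sequence →
  Pre_getvalidwords sequence → Spec_getvalidwords sequence (getvalidwords sequence)

-- ===== LEMMAS AND PROOFS =====
set_option maxHeartbeats 1000000

-- A's per-index membership test, as A's iterated transform leaves it
def pvPpred (seq w : String) : Bool :=
  (PySem.List.pyRange 1 (PySem.Str.len seq) 1).all (fun i =>
    (decide (i < PySem.Str.len w)) &&
    ((PySem.Str.pyGet? w i).elim false
      (fun c => (pvGetLetters (pvCharAt seq i)).contains (String.ofList [c]))))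

-- B's word-major test
def pvQpred (seq w : String) : Bool :=
  decide (PySem.Str.len seq ≤ PySem.Str.len w) &&
  ((List.zip (PySem.Str.slice w (some 1) none).toList
             (PySem.Str.slice seq (some 1) none).toList).all (fun cd =>
    (PySem.Dict.get? pvLetterDigit (String.ofList [cd.1])).elim false
      (fun v => v == String.ofList [cd.2])))

-- transform is a filter
theorem pvTransform_eq_filter (words letters : List String) (index : Int) :
    pvTransform words letters index =
      words.filter (fun word =>
        (decide (index < PySem.Str.len word)) &&
        ((PySem.Str.pyGet? word index).elim false (fun c => letters.contains (String.ofList [c])))) := by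
  unfold pvTransform
  rw [PySem.List.foldl_append_if_eq_filter]
  simp

-- iterated filtering over an index list is one filter with an `all` predicate
theorem foldl_filter_eq_filter_all (p : Int → String → Bool) :
    ∀ (idxs : List Int) (ws : List String),
      idxs.foldl (fun ws i => ws.filter (p i)) ws = ws.filter (fun w => idxs.all (fun i => p i w))
  | [], ws => by simp
  | i :: idxs, ws => by
    simp only [List.foldl_cons, foldl_filter_eq_filter_all p idxs, List.filter_filter, List.all_cons]
    exact List.filter_congr (fun a _ => by rw [Bool.and_comm])

-- every word in any Dictionary bucket is one of the six fixed words
theorem mem_pvGetWords (ch w : String) (h : w ∈ pvGetWords ch) :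
    w ∈ ["tree", "urde", "uref", "urfe", "used", "vrde"] := by
  unfold pvGetWords at h
  cases hg : PySem.Dict.get? pvDict ch with
  | none => rw [hg] at h; simp at h
  | some v =>
    rw [hg] at h
    simp only [Option.getD_some] at h
    have hv : v ∈ pvDict.items.map Prod.snd :=
      List.mem_map_of_mem (PySem.Dict.mem_items_of_get?_eq_some _ hg)
    rw [show pvDict.items.map Prod.snd =
      [[], [], [], [], [], [], [], [], [], [], [], [], [], [], [], [], [], [],
       ["tree"], ["urde", "uref", "urfe", "used"], ["vrde"], [], [], [], []] from rfl] at hv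
    fin_cases hv <;> simp_all <;> tauto

-- the keypad lookup as an if-chain on the digit string
theorem pvGetLetters_eq (s : String) : pvGetLetters s =
    (if "0" = s then [] else if "1" = s then [] else
     if "2" = s then ["a", "b", "c"] else if "3" = s then ["d", "e", "f"] else
     if "4" = s then ["g", "h", "i"] else if "5" = s then ["j", "k", "l"] else
     if "6" = s then ["m", "n", "o"] else if "7" = s then ["p", "q", "r", "s"] else
     if "8" = s then ["t", "u", "v"] else if "9" = s then ["w", "x", "yz"] else []) := by
  have h : pvKeypad = PySem.Dict.mk
    [("0", []), ("1", []), ("2", ["a", "b", "c"]), ("3", ["d", "e", "f"]),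
     ("4", ["g", "h", "i"]), ("5", ["j", "k", "l"]), ("6", ["m", "n", "o"]),
     ("7", ["p", "q", "r", "s"]), ("8", ["t", "u", "v"]), ("9", ["w", "x", "yz"])] := rfl
  unfold pvGetLetters
  rw [h]
  simp only [PySem.Dict.get?_mk_cons, beq_iff_eq]
  split_ifs <;> simp [PySem.Dict.get?]

-- the two per-character tests agree for the characters the six words contain
theorem char_test_eq (wc s : String) (hwc : wc ∈ (["r", "e", "d", "f", "s"] : List String)) :
    decide (wc ∈ pvGetLetters s) =
      (PySem.Dict.get? pvLetterDigit wc).elim false (fun v => v == s) := by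
  fin_cases hwc <;>
    (rw [pvGetLetters_eq]; split_ifs <;>
      first
      | (subst_vars; decide)
      | (simp only [show pvLetterDigit.get? "r" = some "7" from rfl,
            show pvLetterDigit.get? "e" = some "3" from rfl,
            show pvLetterDigit.get? "d" = some "3" from rfl,
            show pvLetterDigit.get? "f" = some "3" from rfl,
            show pvLetterDigit.get? "s" = some "7" from rfl, Option.elim_some];
         simp_all))

-- pvCharAt moved to the list side
theorem pvCharAt_toList (s : String) (i : Int) :
    pvCharAt s i = (match PySem.List.pyGet? s.toList i with
                    | some c => String.ofList [c]
                    | none => "") := by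
  unfold pvCharAt
  simp [PySem.Str.pyGet?]

-- the two word tests agree on each of the six words
theorem perWord (w : String) (hw : w ∈ (["tree", "urde", "uref", "urfe", "used", "vrde"] : List String))
    (seq : String) : pvPpred seq w = pvQpred seq w := by
  have hr := fun s => char_test_eq "r" s (by decide)
  have he := fun s => char_test_eq "e" s (by decide)
  have hd := fun s => char_test_eq "d" s (by decide)
  have hf := fun s => char_test_eq "f" s (by decide)
  have hs := fun s => char_test_eq "s" s (by decide)
  fin_cases hw <;>
  · unfold pvPpred pvQpred
    simp only [pvCharAt_toList, PySem.Str.len_eq, PySem.Str.toList_slice,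
      PySem.Chars.slice_eq_listSlice, PySem.List.slice_from_one,
      show "tree".toList = ['t','r','e','e'] from rfl,
      show "urde".toList = ['u','r','d','e'] from rfl,
      show "uref".toList = ['u','r','e','f'] from rfl,
      show "urfe".toList = ['u','r','f','e'] from rfl,
      show "used".toList = ['u','s','e','d'] from rfl,
      show "vrde".toList = ['v','r','d','e'] from rfl]
    generalize seq.toList = L
    rcases L with _ | ⟨d, T⟩
    · simp
    rcases T with _ | ⟨c1, T⟩
    · simp
    rcases T with _ | ⟨c2, T⟩
    · simp
      rw [show PySem.List.pyRange 1 2 1 = [1] from by decide]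
      simp [show String.ofList ['r'] = "r" from rfl,
            show String.ofList ['e'] = "e" from rfl,
            show String.ofList ['d'] = "d" from rfl,
            show String.ofList ['f'] = "f" from rfl,
            show String.ofList ['s'] = "s" from rfl, hr, he, hd, hf, hs]
    rcases T with _ | ⟨c3, T⟩
    · simp
      rw [show PySem.List.pyRange 1 3 1 = [1, 2] from by decide]
      simp [show String.ofList ['r'] = "r" from rfl,
            show String.ofList ['e'] = "e" from rfl,
            show String.ofList ['d'] = "d" from rfl,
            show String.ofList ['f'] = "f" from rfl,
            show String.ofList ['s'] = "s" from rfl, hr, he, hd, hf, hs]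
    rcases T with _ | ⟨c4, T⟩
    · simp
      rw [show PySem.List.pyRange 1 4 1 = [1, 2, 3] from by decide]
      simp [show String.ofList ['r'] = "r" from rfl,
            show String.ofList ['e'] = "e" from rfl,
            show String.ofList ['d'] = "d" from rfl,
            show String.ofList ['f'] = "f" from rfl,
            show String.ofList ['s'] = "s" from rfl, hr, he, hd, hf, hs]
    · have h4 : (4:Int) ∈ PySem.List.pyRange 1 (↑(d :: c1 :: c2 :: c3 :: c4 :: T).length) 1 := by
        rw [PySem.List.mem_pyRange_one]
        simp [List.length_cons]
        omega
      rw [Bool.eq_iff_iff]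
      constructor
      · intro hall
        have h := List.all_eq_true.mp hall 4 h4
        simp at h
      · intro hrhs
        have h := (Bool.and_eq_true_iff.mp hrhs).1
        simp [List.length_cons] at h
        omega


-- A's inner per-index loop equals B's one-shot filter
theorem inner_eq (seq ch : String) :
    (PySem.List.pyRange 1 (PySem.Str.len seq) 1).foldl
      (fun words index => pvTransform words (pvGetLetters (pvCharAt seq index)) index)
      (pvGetWords ch)
    = (pvGetWords ch).filter (pvQpred seq) := by
  have h1 : ∀ ws : List String,
      (PySem.List.pyRange 1 (PySem.Str.len seq) 1).foldl
        (fun words index => pvTransform words (pvGetLetters (pvCharAt seq index)) index) ws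
      = ws.filter (pvPpred seq) := by
    intro ws
    unfold pvPpred
    rw [← foldl_filter_eq_filter_all]
    exact PySem.List.foldl_congr_mem _ _ _ _ (fun ws i _ => pvTransform_eq_filter ..)
  rw [h1]
  exact List.filter_congr (fun w hw => perWord w (mem_pvGetWords ch w hw) seq)

-- ===== VERDICT (by name: the statement is the Claim_ definition above) =====
theorem getvalidwords_spec : Claim_equal_getvalidwords := by
  intro seq _ _
  unfold Spec_getvalidwords getvalidwords getvalidwords_alt
  cases PySem.Str.pyGet? seq 0 with
  | none => rfl
  | some digit =>
    simp only
    rw [show (fun (result : List (List String)) (character : String) =>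
          let words := (PySem.List.pyRange 1 (PySem.Str.len seq) 1).foldl
            (fun words index => pvTransform words (pvGetLetters (pvCharAt seq index)) index)
            (pvGetWords character)
          if words.length > 0 then result ++ [words] else result)
        = (fun result character =>
            if ((pvGetWords character).filter (pvQpred seq)).length > 0
            then result ++ [(pvGetWords character).filter (pvQpred seq)] else result)
      from funext fun r => funext fun ch => by simp only [inner_eq]]
    rw [PySem.List.foldl_append_ite (fun ch => ((pvGetWords ch).filter (pvQpred seq)).length > 0)
          (fun ch => (pvGetWords ch).filter (pvQpred seq))]
    rw [List.filter_map]
    simp only [List.nil_append]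
    show ((pvGetLetters (String.ofList [digit])).filter
            (fun ch => decide (((pvGetWords ch).filter (pvQpred seq)).length > 0))).map
            (fun ch => (pvGetWords ch).filter (pvQpred seq))
       = ((pvGetLetters (String.ofList [digit])).filter
            ((fun g => !g.isEmpty) ∘ (fun ch => (pvGetWords ch).filter (pvQpred seq)))).map
            (fun ch => (pvGetWords ch).filter (pvQpred seq))
    congr 1
    refine List.filter_congr (fun ch _ => ?_)
    rw [Bool.eq_iff_iff]
    simp [Function.comp, List.length_pos_iff, List.isEmpty_iff, List.filter_eq_nil_iff]
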